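-- pv_equiv track=rewrite | github.com/dtarasov7/yaml-viewer | yaml-viewer.py | _is_block_scalar_indicator
-- ===== SOURCE A (Python) =====
-- def _is_block_scalar_indicator(text: str) -> bool:
--     text = text.strip()
--     if not text:
--         return False
--
--     if text[0] not in ('|', '>'):
--         return False
--
--     if len(text) == 1:
--         return True
--
--     for char in text[1:]:
--         if char not in ('+', '-', '0', '1', '2', '3', '4', '5', '6', '7', '8', '9'):
--             return False
--
--     return True
-- ===== SOURCE B (Python) =====
-- def _is_block_scalar_indicator(text: str) -> bool:
--     # Single left-to-right DFA pass: state 0 = start, 1 = accepting, 2 = dead.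
--     state = 0
--     for char in text.strip():
--         if state == 0:
--             state = 1 if char in '|>' else 2
--         elif state == 1:
--             state = 1 if char in '+-0123456789' else 2
--     return state == 1
-- ===== Notes on version B (the rewrite author's own statement) =====
-- stated objective: alternative
-- what changed: Replaced A's early-return chain of guards and a per-character inner loop with a single explicit two-state DFA fold (start/accepting/dead) over the stripped text, accepting iff the final state is accepting.
import Mathlib
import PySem

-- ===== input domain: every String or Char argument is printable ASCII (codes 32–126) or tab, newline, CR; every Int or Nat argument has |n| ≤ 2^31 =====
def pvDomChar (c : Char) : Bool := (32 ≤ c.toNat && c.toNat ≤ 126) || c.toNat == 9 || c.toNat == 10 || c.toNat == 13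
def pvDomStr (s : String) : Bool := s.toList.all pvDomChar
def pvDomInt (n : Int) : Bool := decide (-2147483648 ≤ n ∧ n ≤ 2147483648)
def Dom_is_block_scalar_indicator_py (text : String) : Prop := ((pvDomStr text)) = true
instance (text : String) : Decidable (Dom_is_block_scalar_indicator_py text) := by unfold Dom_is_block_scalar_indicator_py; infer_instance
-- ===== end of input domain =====

-- B replaces A's early-return guard chain + per-character loop by a single two-state DFA fold over the stripped text (alternative decomposition, same cost).


-- ===== PORT A =====
-- `for char in text[1:]: if char not in (...): return False` — early-return loop
def pvTailOkA : List Char → Bool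
  | [] => true
  | c :: rest =>
    if !(c == '+' || c == '-' || c == '0' || c == '1' || c == '2' || c == '3' || c == '4'
        || c == '5' || c == '6' || c == '7' || c == '8' || c == '9') then false
    else pvTailOkA rest

def is_block_scalar_indicator_py (text : String) : Bool :=
  let t := PySem.Chars.strip text.toList
  if t == [] then false
  else if !(PySem.List.pyGetD t 0 ' ' == '|' || PySem.List.pyGetD t 0 ' ' == '>') then false
  else if t.length == 1 then true
  else pvTailOkA (PySem.List.slice t (some 1) none)

-- ===== PORT B =====
-- the DFA transition: 0 = start, 1 = accepting, 2 = dead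
def pvStepB (state : Nat) (c : Char) : Nat :=
  if state == 0 then (if "|>".toList.contains c then 1 else 2)
  else if state == 1 then (if "+-0123456789".toList.contains c then 1 else 2)
  else state

def is_block_scalar_indicator_py_alt (text : String) : Bool :=
  (PySem.Chars.strip text.toList).foldl pvStepB 0 == 1

-- ===== PRECONDITION & SPEC =====
def Spec_is_block_scalar_indicator_py (text : String) (out : Bool) : Prop := out = is_block_scalar_indicator_py_alt text
instance (text : String) (out : Bool) : Decidable (Spec_is_block_scalar_indicator_py text out) := by unfold Spec_is_block_scalar_indicator_py; infer_instance

-- ===== CLAIM (what is proved, stated in full; the proofs are below) =====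
def Claim_equal_is_block_scalar_indicator_py : Prop := ∀ (text : String), Dom_is_block_scalar_indicator_py text → Spec_is_block_scalar_indicator_py text (is_block_scalar_indicator_py text)

-- ===== LEMMAS AND PROOFS =====
lemma pvStepB_dead (cs : List Char) : cs.foldl pvStepB 2 = 2 := by
  induction cs with
  | nil => rfl
  | cons c rest ih => simpa [pvStepB] using ih

lemma pvStepB_acc (cs : List Char) :
    cs.foldl pvStepB 1 = if cs.all (fun c => "+-0123456789".toList.contains c) then 1 else 2 := by
  induction cs with
  | nil => rfl
  | cons c rest ih =>
    rw [List.foldl_cons, List.all_cons]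
    show List.foldl pvStepB (if "+-0123456789".toList.contains c then 1 else 2) rest = _
    by_cases h : ("+-0123456789".toList.contains c) = true
    · rw [if_pos h, ih, h, Bool.true_and]
    · rw [if_neg h, pvStepB_dead, Bool.eq_false_iff.mpr h, Bool.false_and, if_neg (by simp)]

lemma pvTailOkA_eq_all (cs : List Char) :
    pvTailOkA cs = cs.all (fun c => "+-0123456789".toList.contains c) := by
  induction cs with
  | nil => rfl
  | cons c rest ih =>
    have hcls : ("+-0123456789".toList.contains c)
        = (c == '+' || c == '-' || c == '0' || c == '1' || c == '2' || c == '3' || c == '4'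
          || c == '5' || c == '6' || c == '7' || c == '8' || c == '9') := by
      show (['+','-','0','1','2','3','4','5','6','7','8','9'].contains c) = _
      rw [Bool.eq_iff_iff]
      simp only [List.contains_cons, List.contains_nil, Bool.or_false, Bool.or_eq_true, beq_iff_eq]
      constructor <;> intro h <;> tauto
    simp only [pvTailOkA, List.all_cons, ih, hcls]
    cases h : (c == '+' || c == '-' || c == '0' || c == '1' || c == '2' || c == '3' || c == '4'
          || c == '5' || c == '6' || c == '7' || c == '8' || c == '9')
    · simp
    · simp

-- ===== VERDICT (by name: the statement is the Claim_ definition above) =====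
theorem is_block_scalar_indicator_py_spec : Claim_equal_is_block_scalar_indicator_py := by
  intro text _
  unfold Spec_is_block_scalar_indicator_py
  simp only [is_block_scalar_indicator_py, is_block_scalar_indicator_py_alt]
  cases ht : PySem.Chars.strip text.toList with
  | nil => simp
  | cons c rest =>
    have hhd : ("|>".toList.contains c) = (c == '|' || c == '>') := by
      rw [Bool.eq_iff_iff]
      show (['|','>'].contains c) = true ↔ _
      simp only [List.contains_cons, List.contains_nil, Bool.or_false, Bool.or_eq_true, beq_iff_eq]
    have hB : ((c :: rest).foldl pvStepB 0 == 1)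
        = ((c == '|' || c == '>') && rest.all (fun x => "+-0123456789".toList.contains x)) := by
      rw [List.foldl_cons]
      by_cases hc : (c == '|' || c == '>') = true
      · have hstep : pvStepB 0 c = 1 := by
          show (if "|>".toList.contains c then (1:Nat) else 2) = 1
          rw [hhd, hc]; rfl
        rw [hstep, pvStepB_acc, hc, Bool.true_and]
        split_ifs with h
        · rw [h]; rfl
        · rw [Bool.eq_false_iff.mpr h]; rfl
      · have hstep : pvStepB 0 c = 2 := by
          show (if "|>".toList.contains c then (1:Nat) else 2) = 2
          rw [Bool.not_eq_true] at hc
          rw [hhd, hc]; rfl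
        rw [Bool.not_eq_true] at hc
        rw [hstep, pvStepB_dead, hc, Bool.false_and]; rfl
    have hA : (if (c :: rest) == ([] : List Char) then false
        else if !(PySem.List.pyGetD (c :: rest) 0 ' ' == '|' || PySem.List.pyGetD (c :: rest) 0 ' ' == '>') then false
        else if (c :: rest).length == 1 then true
        else pvTailOkA (PySem.List.slice (c :: rest) (some 1) none))
        = ((c == '|' || c == '>') && rest.all (fun x => "+-0123456789".toList.contains x)) := by
      rw [PySem.List.slice_from_one, List.tail_cons, pvTailOkA_eq_all]
      by_cases hc : (c == '|' || c == '>') = true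
      · cases rest with
        | nil => simp [PySem.List.pyGetD_zero_cons, hc]
        | cons d ds =>
          rw [hc, Bool.true_and]
          have h0 : PySem.List.pyGetD (c :: d :: ds) 0 ' ' = c := by
            simp [PySem.List.pyGetD_zero_cons]
          rw [h0, hc]
          simp
      · rw [Bool.not_eq_true] at hc
        have h0 : PySem.List.pyGetD (c :: rest) 0 ' ' = c := by
          simp [PySem.List.pyGetD_zero_cons]
        rw [h0, hc, Bool.false_and]
        simp
    rw [hA, hB]
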